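-- pv_equiv track=rewrite | github.com/ayayaakasvin/codes | Codewars/Python/square_up.py | square_up
-- ===== SOURCE A (Python) =====
-- def square_up(n):
--     if n == 1:
--         return [1]
--     result = []
--     for i in range(n, 0, -1):
--         for j in range (1, n + 1):
--             if i >= j:
--                 result.append(j)
--             else:
--                 result.append(0)
--
--     result.reverse()
--     return result
-- ===== SOURCE B (Python) =====
-- def square_up(n):
--     result = []
--     for r in range(1, n + 1):
--         result.extend([0] * (n - r) + list(range(r, 0, -1)))
--     return result
-- ===== Notes on version B (the rewrite author's own statement) =====
-- stated objective: simpler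
-- what changed: B emits the final list directly row by row ((n-r) zeros then r..1) via extend, removing A's inner per-element conditional, the descending outer loop, the final reverse, and the n==1 special case.
import Mathlib
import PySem

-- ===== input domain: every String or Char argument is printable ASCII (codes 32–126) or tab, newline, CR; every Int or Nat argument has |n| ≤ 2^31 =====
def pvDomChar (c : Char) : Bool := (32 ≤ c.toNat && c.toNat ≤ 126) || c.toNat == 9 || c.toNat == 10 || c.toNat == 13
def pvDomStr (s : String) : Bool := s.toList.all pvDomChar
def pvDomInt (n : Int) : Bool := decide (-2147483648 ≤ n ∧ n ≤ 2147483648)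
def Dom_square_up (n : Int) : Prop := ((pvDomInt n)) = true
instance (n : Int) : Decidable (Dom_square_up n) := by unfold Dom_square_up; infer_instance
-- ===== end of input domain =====

-- ===== PORT A =====
def square_up (n : Int) : List Int :=
  if n = 1 then [1] else
    ((PySem.List.pyRange n 0 (-1)).foldl (fun result i =>
      (PySem.List.pyRange 1 (n + 1) 1).foldl (fun result j =>
        if i ≥ j then result ++ [j] else result ++ [0]) result) []).reverse

-- ===== PORT B =====
def square_up_alt (n : Int) : List Int :=
  (PySem.List.pyRange 1 (n + 1) 1).foldl (fun result r =>
    result ++ (List.replicate (n - r).toNat 0 ++ PySem.List.pyRange r 0 (-1))) []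

-- ===== PRECONDITION & SPEC =====
def Spec_square_up (n : Int) (out : List Int) : Prop := out = square_up_alt n
instance (n : Int) (out : List Int) : Decidable (Spec_square_up n out) := by unfold Spec_square_up; infer_instance

-- ===== CLAIM (what is proved, stated in full; the proofs are below) =====
def Claim_equal_square_up : Prop := ∀ (n : Int), Dom_square_up n → Spec_square_up n (square_up n)

-- ===== LEMMAS AND PROOFS =====

-- ===== VERDICT (by name: the statement is the Claim_ definition above) =====
-- one row of A, before the final reverse
def pvRowA (n i : Int) : List Int :=
  (PySem.List.pyRange 1 (n + 1) 1).map (fun j => if i ≥ j then j else 0)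

theorem pvRowA_reverse (n i : Int) (h1 : 1 ≤ i) (h2 : i ≤ n) :
    (pvRowA n i).reverse = List.replicate (n - i).toNat 0 ++ PySem.List.pyRange i 0 (-1) := by
  have hsplit : PySem.List.pyRange 1 (n + 1) 1
      = PySem.List.pyRange 1 (i + 1) 1 ++ PySem.List.pyRange (i + 1) (n + 1) 1 :=
    PySem.List.pyRange_one_append 1 (i + 1) (n + 1) (by omega) (by omega)
  have hlo : (PySem.List.pyRange 1 (i + 1) 1).map (fun j => if i ≥ j then j else 0)
      = PySem.List.pyRange 1 (i + 1) 1 := by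
    have : (PySem.List.pyRange 1 (i + 1) 1).map (fun j => if i ≥ j then j else 0)
        = (PySem.List.pyRange 1 (i + 1) 1).map id := by
      apply List.map_congr_left
      intro j hj
      rw [PySem.List.mem_pyRange_one] at hj
      simp only [ge_iff_le, if_pos (by omega : j ≤ i), id]
    rw [this, List.map_id]
  have hhi : (PySem.List.pyRange (i + 1) (n + 1) 1).map (fun j => if i ≥ j then j else 0)
      = List.replicate (n - i).toNat 0 := by
    rw [List.map_eq_replicate_iff.mpr, PySem.List.length_pyRange_one]
    · congr 1; omega
    · intro j hj
      rw [PySem.List.mem_pyRange_one] at hj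
      simp only [ge_iff_le, if_neg (by omega : ¬ j ≤ i)]
  rw [pvRowA, hsplit, List.map_append, hlo, hhi, List.reverse_append,
    List.reverse_replicate, PySem.List.pyRange_neg_one_eq_reverse i 0]
  norm_num

theorem square_up_eq_alt (n : Int) : square_up n = square_up_alt n := by
  have key : ∀ m : Int,
      ((PySem.List.pyRange m 0 (-1)).foldl (fun result i =>
        (PySem.List.pyRange 1 (n + 1) 1).foldl (fun result j =>
          if i ≥ j then result ++ [j] else result ++ [0]) result) []).reverse
      = (PySem.List.pyRange 1 (m + 1) 1).flatMap
          (fun i => (pvRowA n i).reverse) := by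
    intro m
    have hinner : ∀ (acc : List Int) (i : Int),
        (PySem.List.pyRange 1 (n + 1) 1).foldl (fun result j =>
          if i ≥ j then result ++ [j] else result ++ [0]) acc = acc ++ pvRowA n i := by
      intro acc i
      have := PySem.List.foldl_append_singleton_eq_map
        (l := PySem.List.pyRange 1 (n + 1) 1) (f := fun j => if i ≥ j then j else 0) (acc := acc)
      rw [pvRowA, ← this]
      apply List.foldl_ext
      intro a x _; split_ifs <;> simp
    calc ((PySem.List.pyRange m 0 (-1)).foldl (fun result i =>
            (PySem.List.pyRange 1 (n + 1) 1).foldl (fun result j =>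
              if i ≥ j then result ++ [j] else result ++ [0]) result) []).reverse
        = ((PySem.List.pyRange m 0 (-1)).foldl (fun result i => result ++ pvRowA n i) []).reverse := by
          congr 1
          apply List.foldl_ext
          intro a x _; exact hinner a x
      _ = ((PySem.List.pyRange m 0 (-1)).flatMap (pvRowA n)).reverse := by
            rw [PySem.List.foldl_append_eq_flatMap]; simp
      _ = (PySem.List.pyRange m 0 (-1)).reverse.flatMap (fun i => (pvRowA n i).reverse) := by
            rw [List.reverse_flatMap]; rfl
      _ = (PySem.List.pyRange 1 (m + 1) 1).flatMap (fun i => (pvRowA n i).reverse) := by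
            rw [PySem.List.pyRange_neg_one_eq_reverse m 0, List.reverse_reverse]
            norm_num
  have halt : square_up_alt n
      = (PySem.List.pyRange 1 (n + 1) 1).flatMap
          (fun r => List.replicate (n - r).toNat 0 ++ PySem.List.pyRange r 0 (-1)) := by
    rw [square_up_alt, PySem.List.foldl_append_eq_flatMap]; simp
  by_cases h1 : n = 1
  · subst h1; decide
  · rw [square_up, if_neg h1, key n, halt]
    apply List.flatMap_congr
    intro i hi
    rw [PySem.List.mem_pyRange_one] at hi
    exact pvRowA_reverse n i (by omega) (by omega)

theorem square_up_spec : Claim_equal_square_up := by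
  intro n _
  unfold Spec_square_up
  exact square_up_eq_alt n
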